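-- pv_equiv track=rewrite | github.com/Aditya239233/MDP | algorithm/planner/translate.py | neg_to_pos_to_neg
-- ===== SOURCE A (Python) =====
-- def neg_to_pos_to_neg(section):
--     neg = False
--     pos_index = 1
--
--     if not (section[0][3] < 0):
--         return False
--
--     while pos_index < len(section) and section[pos_index][3] < 0:
--         pos_index += 1
--
--     if pos_index == len(section):
--         return False
--
--     for i in range(pos_index, len(section)):
--         if section[i][3] < 0:
--             neg = True
--             break
--
--     return neg
-- ===== SOURCE B (Python) =====
-- def neg_to_pos_to_neg(section):
--     if not (section[0][3] < 0):
--         return False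
--     seen_nonneg = False
--     for x in section:
--         if x[3] >= 0:
--             seen_nonneg = True
--         elif seen_nonneg:
--             return True
--     return False
-- ===== Notes on version B (the rewrite author's own statement) =====
-- stated objective: simpler
-- what changed: Replaced the guard + index-based skip-while + search-for-loop with a single linear pass over the list carrying one 'seen_nonneg' flag.
import Mathlib
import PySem

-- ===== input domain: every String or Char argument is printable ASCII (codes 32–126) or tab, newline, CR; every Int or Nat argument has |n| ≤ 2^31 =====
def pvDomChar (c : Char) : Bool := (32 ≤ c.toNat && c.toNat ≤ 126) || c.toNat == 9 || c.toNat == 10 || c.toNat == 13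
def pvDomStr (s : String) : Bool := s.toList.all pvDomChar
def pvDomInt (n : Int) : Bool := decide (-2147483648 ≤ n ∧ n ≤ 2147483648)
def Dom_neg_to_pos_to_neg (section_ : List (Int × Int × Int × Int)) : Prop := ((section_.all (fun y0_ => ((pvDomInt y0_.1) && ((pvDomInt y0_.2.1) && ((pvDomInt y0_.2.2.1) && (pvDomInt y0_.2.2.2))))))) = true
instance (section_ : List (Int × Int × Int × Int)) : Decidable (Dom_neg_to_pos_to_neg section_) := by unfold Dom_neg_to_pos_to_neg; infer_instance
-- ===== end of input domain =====

-- ===== PORT A =====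
-- B changes: one linear pass with a 'seen nonneg' flag instead of guard + skip-while + search loop (objective: simpler).
-- Port A helpers: pvFourth = t[3]; pvSkip = the index-advancing while loop; pvFind = the searching for-loop with break.
def pvFourth (t : Int × Int × Int × Int) : Int := t.2.2.2

def pvSkip (s : List (Int × Int × Int × Int)) (i : Nat) : Nat :=
  if h : i < s.length then
    if pvFourth s[i] < 0 then pvSkip s (i + 1) else i
  else i
termination_by s.length - i

def pvFind (s : List (Int × Int × Int × Int)) (i : Nat) : Bool :=
  if h : i < s.length then
    if pvFourth s[i] < 0 then true else pvFind s (i + 1)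
  else false
termination_by s.length - i

def neg_to_pos_to_neg (section_ : List (Int × Int × Int × Int)) : Bool :=
  match PySem.List.pyGet? section_ 0 with
  | none => false  -- Python raises IndexError here; excluded by Pre_
  | some t =>
    if pvFourth t < 0 then
      let pos_index := pvSkip section_ 1
      if pos_index = section_.length then false
      else pvFind section_ pos_index
    else false

-- ===== PORT B =====
def pvLoop : List (Int × Int × Int × Int) → Bool → Bool
  | [], _ => false
  | x :: rest, seen =>
    if pvFourth x ≥ 0 then pvLoop rest true
    else if seen then true else pvLoop rest seen

def neg_to_pos_to_neg_alt (section_ : List (Int × Int × Int × Int)) : Bool :=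
  match section_ with
  | [] => false  -- Python raises IndexError here; excluded by Pre_
  | x :: _ =>
    if pvFourth x < 0 then pvLoop section_ false else false

-- ===== PRECONDITION & SPEC =====
-- Pre_ excludes exactly the empty list, on which A (and B) raise IndexError at section[0][3].
def Pre_neg_to_pos_to_neg (section_ : List (Int × Int × Int × Int)) : Prop := section_ ≠ []
instance (section_ : List (Int × Int × Int × Int)) : Decidable (Pre_neg_to_pos_to_neg section_) := by unfold Pre_neg_to_pos_to_neg; infer_instance
def pvWitness_neg_to_pos_to_neg : (List (Int × Int × Int × Int)) := [(0, 0, 0, -1), (0, 0, 0, 2), (0, 0, 0, -3)]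
def Spec_neg_to_pos_to_neg (section_ : List (Int × Int × Int × Int)) (out : Bool) : Prop := out = neg_to_pos_to_neg_alt section_
instance (section_ : List (Int × Int × Int × Int)) (out : Bool) : Decidable (Spec_neg_to_pos_to_neg section_ out) := by unfold Spec_neg_to_pos_to_neg; infer_instance

-- ===== CLAIM (what is proved, stated in full; the proofs are below) =====
def Claim_equal_neg_to_pos_to_neg : Prop := ∀ (section_ : List (Int × Int × Int × Int)), Dom_neg_to_pos_to_neg section_ → Pre_neg_to_pos_to_neg section_ → Spec_neg_to_pos_to_neg section_ (neg_to_pos_to_neg section_)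

-- ===== LEMMAS AND PROOFS =====
def pvP (t : Int × Int × Int × Int) : Bool := decide (pvFourth t < 0)

theorem pvSkip_le (s : List (Int × Int × Int × Int)) (i : Nat) (h : i ≤ s.length) :
    pvSkip s i ≤ s.length := by
  unfold pvSkip
  split
  · split
    · exact pvSkip_le s (i + 1) (by omega)
    · exact h
  · exact h
termination_by s.length - i

theorem pvSkip_drop (s : List (Int × Int × Int × Int)) (i : Nat) :
    s.drop (pvSkip s i) = (s.drop i).dropWhile pvP := by
  unfold pvSkip
  split
  · rename_i h
    rw [List.drop_eq_getElem_cons h]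
    split
    · rename_i hneg
      rw [List.dropWhile_cons_of_pos (by simpa [pvP] using hneg)]
      exact pvSkip_drop s (i + 1)
    · rename_i hneg
      rw [List.dropWhile_cons_of_neg (by simpa [pvP] using hneg)]
      exact (List.drop_eq_getElem_cons h)
  · rename_i h
    rw [List.drop_eq_nil_of_le (by omega), List.dropWhile_nil]
termination_by s.length - i

theorem pvFind_any (s : List (Int × Int × Int × Int)) (i : Nat) :
    pvFind s i = (s.drop i).any pvP := by
  unfold pvFind
  split
  · rename_i h
    rw [List.drop_eq_getElem_cons h, List.any_cons]
    split
    · rename_i hneg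
      simp [pvP, hneg]
    · rename_i hneg
      have : pvP s[i] = false := by simpa [pvP] using hneg
      rw [this, Bool.false_or]
      exact pvFind_any s (i + 1)
  · rename_i h
    rw [List.drop_eq_nil_of_le (by omega)]
    simp
termination_by s.length - i

theorem pvLoop_true (v : List (Int × Int × Int × Int)) : pvLoop v true = v.any pvP := by
  induction v with
  | nil => simp [pvLoop]
  | cons x rest ih =>
    by_cases hx : pvFourth x ≥ 0
    · simp [pvLoop, hx, ih, pvP, show ¬ pvFourth x < 0 by omega]
    · simp [pvLoop, hx, pvP, show pvFourth x < 0 by omega]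

theorem pvLoop_false (t : List (Int × Int × Int × Int)) :
    pvLoop t false = (match t.dropWhile pvP with
      | [] => false
      | _ :: rest => pvLoop rest true) := by
  induction t with
  | nil => simp [pvLoop]
  | cons x rest ih =>
    by_cases hx : pvFourth x < 0
    · rw [List.dropWhile_cons_of_pos (by simpa [pvP] using hx)]
      simpa [pvLoop, show ¬ pvFourth x ≥ 0 by omega] using ih
    · rw [List.dropWhile_cons_of_neg (by simpa [pvP] using hx)]
      simp [pvLoop, show pvFourth x ≥ 0 by omega]

theorem pvDropWhile_head {t : List (Int × Int × Int × Int)} {y : Int × Int × Int × Int}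
    {rest : List (Int × Int × Int × Int)} (h : t.dropWhile pvP = y :: rest) : pvP y = false := by
  induction t with
  | nil => simp at h
  | cons x xs ih =>
    by_cases hx : pvP x = true
    · rw [List.dropWhile_cons_of_pos hx] at h; exact ih h
    · rw [List.dropWhile_cons_of_neg hx] at h
      cases h; simpa using hx

-- ===== VERDICT (by name: the statement is the Claim_ definition above) =====
theorem neg_to_pos_to_neg_spec : Claim_equal_neg_to_pos_to_neg := by
  intro section_ _ hpre
  unfold Spec_neg_to_pos_to_neg
  match section_ with
  | [] => exact absurd rfl hpre
  | x :: t =>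
    show neg_to_pos_to_neg (x :: t) = neg_to_pos_to_neg_alt (x :: t)
    by_cases hx : pvFourth x < 0
    · have hget : PySem.List.pyGet? (x :: t) 0 = some x := by
        simp [PySem.List.pyGet?, PySem.List.pyIdx?]
      rw [neg_to_pos_to_neg, hget]
      simp only [hx, if_pos]
      have hdrop : (x :: t).drop (pvSkip (x :: t) 1) = t.dropWhile pvP := by
        simpa using pvSkip_drop (x :: t) 1
      rw [neg_to_pos_to_neg_alt]
      simp only [hx, if_pos]
      rw [show pvLoop (x :: t) false = pvLoop t false by
        simp [pvLoop, show ¬ pvFourth x ≥ 0 by omega], pvLoop_false]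
      cases hu : t.dropWhile pvP with
      | nil =>
        have hlen : pvSkip (x :: t) 1 = (x :: t).length := by
          have h1 := pvSkip_le (x :: t) 1 (by simp)
          have : (x :: t).length ≤ pvSkip (x :: t) 1 := by
            rw [← List.drop_eq_nil_iff]; rw [hdrop, hu]
          omega
        simp [hlen]
      | cons y rest =>
        have hne : pvSkip (x :: t) 1 ≠ (x :: t).length := by
          intro he
          rw [he, List.drop_length] at hdrop
          rw [hu] at hdrop
          exact List.cons_ne_nil _ _ hdrop.symm
        rw [if_neg hne, pvFind_any, hdrop, hu, List.any_cons,
          pvDropWhile_head hu, Bool.false_or]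
        exact (pvLoop_true rest).symm
    · rw [neg_to_pos_to_neg, neg_to_pos_to_neg_alt]
      simp [PySem.List.pyGet?, PySem.List.pyIdx?, hx]
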